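-- pv_equiv track=rewrite | github.com/tbogoodnews/Advent-of-Code | 2015/Day-3/part-2.py | path_calc
-- ===== SOURCE A (Python) =====
-- def path_calc(route):
--     x = 0
--     y = 0
--     houses = []
--
--     for i in route:
--         match i:
--             case ">":
--                 x += 1
--             case "<":
--                 x -= 1
--             case "^":
--                 y += 1
--             case "v":
--                 y -= 1
--
--         houses.append(str(x)+"x"+str(y))
--
--     return houses
-- ===== SOURCE B (Python) =====
-- def prefix_counts(route, ch):
--     # counts[i] = number of occurrences of ch in route[:i+1]
--     counts = []
--     t = 0
--     for c in route:
--         t += (c == ch)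
--         counts.append(t)
--     return counts
--
-- def path_calc(route):
--     # counting formulation: x after move i = #('>') - #('<') in the prefix, y likewise
--     r = prefix_counts(route, '>')
--     l = prefix_counts(route, '<')
--     u = prefix_counts(route, '^')
--     d = prefix_counts(route, 'v')
--     return [str(a - b) + "x" + str(c - e) for a, b, c, e in zip(r, l, u, d)]
-- ===== Notes on version B (the rewrite author's own statement) =====
-- stated objective: alternative
-- what changed: B replaces A's stateful walk simulation with a counting formulation: it builds four prefix-count lists (one per direction character) in separate passes and derives each position arithmetically as (#'>'-#'<', #'^'-#'v') of the prefix, formatting via zip.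
import Mathlib
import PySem

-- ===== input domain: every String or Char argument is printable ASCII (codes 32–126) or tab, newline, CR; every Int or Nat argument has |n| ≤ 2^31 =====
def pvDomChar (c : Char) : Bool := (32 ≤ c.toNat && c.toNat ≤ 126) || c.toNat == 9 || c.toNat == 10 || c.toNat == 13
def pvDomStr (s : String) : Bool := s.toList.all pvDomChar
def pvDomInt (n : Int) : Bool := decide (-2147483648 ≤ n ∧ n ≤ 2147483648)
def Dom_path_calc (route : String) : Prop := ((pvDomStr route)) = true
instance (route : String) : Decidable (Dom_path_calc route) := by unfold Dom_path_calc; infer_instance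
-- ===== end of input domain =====

-- B replaces A's stateful walk with a counting formulation: four prefix-count passes
-- (one per direction char) combined arithmetically per index (alternative decomposition, same cost).


-- ===== PORT A =====
-- A: one loop over the route, mutating x,y by a match on the char and appending "x"x"y".
-- pvStepA is the loop body (one iteration of A's for-loop).
def pvStepA (st : Int × Int × List String) (i : Char) : Int × Int × List String :=
  let x := st.1
  let y := st.2.1
  let houses := st.2.2
  let xy : Int × Int :=
    if i = '>' then (x + 1, y)
    else if i = '<' then (x - 1, y)
    else if i = '^' then (x, y + 1)
    else if i = 'v' then (x, y - 1)
    else (x, y)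
  (xy.1, xy.2, houses ++ [PySem.Int.toStr xy.1 ++ "x" ++ PySem.Int.toStr xy.2])

def path_calc (route : String) : List String :=
  (route.toList.foldl pvStepA ((0 : Int), (0 : Int), ([] : List String))).2.2

-- ===== PORT B =====
-- prefix_counts: running count of ch over the string, one entry per character.
def pvPCGo (ch : Char) (t : Int) : List Char → List Int
  | [] => []
  | c :: cs =>
    let t' := t + (if c = ch then 1 else 0)
    t' :: pvPCGo ch t' cs

def pvPrefixCounts (route : String) (ch : Char) : List Int :=
  pvPCGo ch 0 route.toList

-- zip of the four count lists with the formatting comprehension.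
def pvZipFmt : List Int → List Int → List Int → List Int → List String
  | a :: as_, b :: bs, c :: cs, e :: es =>
    (PySem.Int.toStr (a - b) ++ "x" ++ PySem.Int.toStr (c - e)) :: pvZipFmt as_ bs cs es
  | _, _, _, _ => []

def path_calc_alt (route : String) : List String :=
  pvZipFmt (pvPrefixCounts route '>') (pvPrefixCounts route '<')
           (pvPrefixCounts route '^') (pvPrefixCounts route 'v')

-- ===== PRECONDITION & SPEC =====
def Spec_path_calc (route : String) (out : List String) : Prop := out = path_calc_alt route
instance (route : String) (out : List String) : Decidable (Spec_path_calc route out) := by unfold Spec_path_calc; infer_instance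

-- ===== CLAIM (what is proved, stated in full; the proofs are below) =====
def Claim_equal_path_calc : Prop := ∀ (route : String), Dom_path_calc route → Spec_path_calc route (path_calc route)

-- ===== LEMMAS AND PROOFS =====

-- One iteration of A's loop, written with the per-char count increments of B's four directions.
theorem pvStepA_eq (x y : Int) (hs : List String) (i : Char) :
    pvStepA (x, y, hs) i =
    (x + ((if i = '>' then (1 : Int) else 0) - (if i = '<' then (1 : Int) else 0)),
     y + ((if i = '^' then (1 : Int) else 0) - (if i = 'v' then (1 : Int) else 0)),
     hs ++ [PySem.Int.toStr (x + ((if i = '>' then (1 : Int) else 0) - (if i = '<' then (1 : Int) else 0)))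
            ++ "x" ++
            PySem.Int.toStr (y + ((if i = '^' then (1 : Int) else 0) - (if i = 'v' then (1 : Int) else 0)))]) := by
  unfold pvStepA
  have e1 : ∀ z : Int, z - 1 = z + -1 := fun z => by ring
  split_ifs with h1 h2 h3 h4 <;> simp_all

-- Loop invariant: A's fold from state (r-l, u-d, hs) emits hs followed by the
-- zipped formatting of the four running counts started at r, l, u, d.
theorem pv_fold_counts (cs : List Char) (r l u d : Int) (hs : List String) :
    (cs.foldl pvStepA (r - l, u - d, hs)).2.2 =
    hs ++ pvZipFmt (pvPCGo '>' r cs) (pvPCGo '<' l cs) (pvPCGo '^' u cs) (pvPCGo 'v' d cs) := by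
  induction cs generalizing r l u d hs with
  | nil => simp [pvPCGo, pvZipFmt]
  | cons i cs ih =>
    have hx : r - l + ((if i = '>' then (1 : Int) else 0) - (if i = '<' then (1 : Int) else 0))
        = (r + (if i = '>' then (1 : Int) else 0)) - (l + (if i = '<' then (1 : Int) else 0)) := by
      ring
    have hy : u - d + ((if i = '^' then (1 : Int) else 0) - (if i = 'v' then (1 : Int) else 0))
        = (u + (if i = '^' then (1 : Int) else 0)) - (d + (if i = 'v' then (1 : Int) else 0)) := by
      ring
    rw [List.foldl_cons, pvStepA_eq, hx, hy, ih]
    simp [pvPCGo, pvZipFmt]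

-- ===== VERDICT (by name: the statement is the Claim_ definition above) =====
theorem path_calc_spec : Claim_equal_path_calc := by
  intro route _
  unfold Spec_path_calc path_calc path_calc_alt pvPrefixCounts
  have := pv_fold_counts route.toList 0 0 0 0 []
  simpa using this
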